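-- pv_equiv track=rewrite | github.com/oouyang/xsw | octile_api.py | _cells_form_rectangle
-- ===== SOURCE A (Python) =====
-- def _cells_form_rectangle(
--     cells: list[tuple[int, int]], valid_sizes: list[tuple[int, int]]
-- ) -> bool:
--     """Check if cells form a solid rectangle matching one of valid_sizes."""
--     rows = [r for r, c in cells]
--     cols = [c for r, c in cells]
--     min_r, max_r = min(rows), max(rows)
--     min_c, max_c = min(cols), max(cols)
--     h = max_r - min_r + 1
--     w = max_c - min_c + 1
--     if (h, w) not in valid_sizes:
--         return False
--     if len(cells) != h * w:
--         return False
--     expected = {(min_r + dr, min_c + dc) for dr in range(h) for dc in range(w)}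
--     return set(cells) == expected
-- ===== SOURCE B (Python) =====
-- def _cells_form_rectangle(
--     cells: list[tuple[int, int]], valid_sizes: list[tuple[int, int]]
-- ) -> bool:
--     """Check if cells form a solid rectangle matching one of valid_sizes."""
--     s = sorted(cells)
--     r0, c0 = s[0]
--     r1, c1 = s[-1]
--     h = r1 - r0 + 1
--     w = c1 - c0 + 1
--     if (h, w) not in valid_sizes or len(s) != h * w:
--         return False
--     # sorted order of a solid rectangle is exactly row-major enumeration
--     for k, (r, c) in enumerate(s):
--         if r != r0 + k // w or c != c0 + k % w:
--             return False
--     return True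
-- ===== Notes on version B (the rewrite author's own statement) =====
-- stated objective: alternative
-- what changed: B sorts the cells lexicographically and checks the sorted sequence is exactly the row-major enumeration (r0 + k//w, c0 + k%w) of the box spanned by the first and last sorted cell, instead of A's four min/max passes plus materializing the expected coordinate set and comparing sets.
import Mathlib
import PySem

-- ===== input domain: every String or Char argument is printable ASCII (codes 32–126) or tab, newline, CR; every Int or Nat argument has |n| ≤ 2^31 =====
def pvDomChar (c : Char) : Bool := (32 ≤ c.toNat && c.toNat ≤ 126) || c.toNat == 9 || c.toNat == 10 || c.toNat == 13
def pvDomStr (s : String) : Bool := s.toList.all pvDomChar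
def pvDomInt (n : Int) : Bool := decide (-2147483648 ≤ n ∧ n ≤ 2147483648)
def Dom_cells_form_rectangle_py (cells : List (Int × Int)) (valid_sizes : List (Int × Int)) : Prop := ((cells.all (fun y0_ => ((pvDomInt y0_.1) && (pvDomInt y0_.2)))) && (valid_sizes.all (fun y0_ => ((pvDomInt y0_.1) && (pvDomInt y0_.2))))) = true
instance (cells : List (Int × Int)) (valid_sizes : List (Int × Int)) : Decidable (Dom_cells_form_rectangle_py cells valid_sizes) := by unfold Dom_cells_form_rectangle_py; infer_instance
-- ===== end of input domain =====

-- B sorts the cells lexicographically and checks the sorted sequence is exactly the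
-- row-major enumeration (r0 + k//w, c0 + k%w) of the box spanned by the first and last
-- sorted cell, instead of A's min/max passes + expected-set construction + set comparison;
-- objective: alternative (sort-then-scan, no sets).

-- ===== PORT A =====
def cells_form_rectangle_py (cells : List (Int × Int)) (valid_sizes : List (Int × Int)) : Bool :=
  let rows := cells.map (fun rc => rc.1)
  let cols := cells.map (fun rc => rc.2)
  match PySem.List.min? rows (fun x => x), PySem.List.max? rows (fun x => x),
        PySem.List.min? cols (fun x => x), PySem.List.max? cols (fun x => x) with
  | some min_r, some max_r, some min_c, some max_c =>
    let h := max_r - min_r + 1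
    let w := max_c - min_c + 1
    if (h, w) ∉ valid_sizes then false
    else if (cells.length : Int) ≠ h * w then false
    else
      let expected : PySem.Set (Int × Int) :=
        (PySem.List.pyRange 0 h 1).foldl (fun s dr =>
          (PySem.List.pyRange 0 w 1).foldl (fun s2 dc =>
            PySem.Set.add s2 (min_r + dr, min_c + dc)) s) PySem.Set.empty
      PySem.Set.equal (PySem.Set.ofList cells) expected
  | _, _, _, _ => false   -- Python: min() of an empty list raises ValueError; excluded by Pre_

-- ===== PORT B =====
def cells_form_rectangle_py_alt (cells : List (Int × Int)) (valid_sizes : List (Int × Int)) : Bool :=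
  match PySem.List.sorted2 cells Prod.fst Prod.snd false with   -- s = sorted(cells): lexicographic
  | [] => false   -- Python: "r0, c0 = s[0]" raises IndexError on empty cells; excluded by Pre_
  | p0 :: t =>
    let r0 := p0.1   -- r0, c0 = s[0]
    let c0 := p0.2
    let p1 := (p0 :: t).getLast (List.cons_ne_nil p0 t)   -- s[-1]: exact, the list is nonempty
    let r1 := p1.1
    let c1 := p1.2
    let h := r1 - r0 + 1
    let w := c1 - c0 + 1
    if (h, w) ∉ valid_sizes ∨ ((p0 :: t).length : Int) ≠ h * w then false
    else
      (PySem.List.enumerate (p0 :: t)).all (fun kp =>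
        decide (kp.2.1 = r0 + PySem.Int.floordiv kp.1 w ∧ kp.2.2 = c0 + PySem.Int.mod kp.1 w))

-- ===== PRECONDITION & SPEC =====
-- Pre_ excludes only the empty cell list, on which Python A raises ValueError (min of empty)
-- and Python B raises IndexError.
def Pre_cells_form_rectangle_py (cells : List (Int × Int)) (_valid_sizes : List (Int × Int)) : Prop := cells ≠ []
instance (cells : List (Int × Int)) (valid_sizes : List (Int × Int)) : Decidable (Pre_cells_form_rectangle_py cells valid_sizes) := by unfold Pre_cells_form_rectangle_py; infer_instance
def pvWitness_cells_form_rectangle_py : (List (Int × Int)) × (List (Int × Int)) := ([(0, 0), (0, 1)], [(1, 2)])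

def Spec_cells_form_rectangle_py (cells : List (Int × Int)) (valid_sizes : List (Int × Int)) (out : Bool) : Prop := out = cells_form_rectangle_py_alt cells valid_sizes
instance (cells : List (Int × Int)) (valid_sizes : List (Int × Int)) (out : Bool) : Decidable (Spec_cells_form_rectangle_py cells valid_sizes out) := by unfold Spec_cells_form_rectangle_py; infer_instance

-- ===== CLAIM (what is proved, stated in full; the proofs are below) =====
def Claim_equal_cells_form_rectangle_py : Prop := ∀ (cells : List (Int × Int)) (valid_sizes : List (Int × Int)), Dom_cells_form_rectangle_py cells valid_sizes → Pre_cells_form_rectangle_py cells valid_sizes → Spec_cells_form_rectangle_py cells valid_sizes (cells_form_rectangle_py cells valid_sizes)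

-- ===== LEMMAS AND PROOFS =====

-- the row-major enumeration of the h × w box with top-left corner (r0, c0)
def gridList (r0 c0 : Int) (h w : Nat) : List (Int × Int) :=
  (List.range h).flatMap (fun i : Nat => (List.range w).map (fun j : Nat => (r0 + (i : Int), c0 + (j : Int))))

-- "the cells are a solid rectangle of an accepted size": the common characterization
-- both ports are reduced to
def IsGrid (cells valid_sizes : List (Int × Int)) : Prop :=
  ∃ (r0 c0 : Int) (h w : Nat), 0 < h ∧ 0 < w ∧ ((h : Int), (w : Int)) ∈ valid_sizes ∧
    PySem.List.sorted cells (fun p : Int × Int => toLex p) false = gridList r0 c0 h w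

theorem length_gridList (r0 c0 : Int) (h w : Nat) : (gridList r0 c0 h w).length = h * w := by
  simp [gridList, List.length_flatMap, List.map_const']

theorem mem_gridList (r0 c0 : Int) (h w : Nat) (p : Int × Int) :
    p ∈ gridList r0 c0 h w ↔
      r0 ≤ p.1 ∧ p.1 < r0 + h ∧ c0 ≤ p.2 ∧ p.2 < c0 + w := by
  obtain ⟨a, b⟩ := p
  simp only [gridList, List.mem_flatMap, List.mem_map, List.mem_range]
  constructor
  · rintro ⟨i, hi, ⟨j, hj, he⟩⟩
    rw [Prod.mk.injEq] at he
    omega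
  · rintro ⟨h1, h2, h3, h4⟩
    refine ⟨(a - r0).toNat, by omega, (b - c0).toNat, by omega, ?_⟩
    simp only [Prod.mk.injEq]
    omega

theorem getElem_gridList (r0 c0 : Int) (h w k : Nat) (hw : 0 < w) (hk : k < h * w) :
    (gridList r0 c0 h w)[k]'(by rw [length_gridList]; exact hk)
      = (r0 + (k / w : Nat), c0 + (k % w : Nat)) := by
  induction h generalizing k with
  | zero => omega
  | succ n ih =>
    have hsplit : gridList r0 c0 (n + 1) w
        = gridList r0 c0 n w ++ (List.range w).map (fun j : Nat => (r0 + (n : Int), c0 + (j : Int))) := by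
      simp [gridList, List.range_succ]
    have hnw : (n + 1) * w = n * w + w := by ring
    by_cases hlt : k < n * w
    · rw [List.getElem_of_eq hsplit, List.getElem_append_left (by rw [length_gridList]; exact hlt)]
      exact ih k hlt
    · have hk' : k - n * w < w := by omega
      have hlen : (gridList r0 c0 n w).length ≤ k := by rw [length_gridList]; omega
      rw [List.getElem_of_eq hsplit, List.getElem_append_right hlen]
      have hdm := Nat.div_add_mod k w
      have hdiv : k / w = n := by
        rcases Nat.lt_trichotomy (k / w) n with hlt2 | he | hgt
        · exfalso
          have : w * (k / w) + w ≤ w * n := by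
            calc w * (k / w) + w = w * (k / w + 1) := by ring
            _ ≤ w * n := Nat.mul_le_mul_left w hlt2
          have hmw : w * n = n * w := Nat.mul_comm w n
          have hmlt := Nat.mod_lt k hw
          omega
        · exact he
        · exfalso
          have : w * n + w ≤ w * (k / w) := by
            calc w * n + w = w * (n + 1) := by ring
            _ ≤ w * (k / w) := Nat.mul_le_mul_left w hgt
          have hmw : w * n = n * w := Nat.mul_comm w n
          omega
      have hmod : k % w = k - n * w := by
        rw [hdiv] at hdm
        have hmw : w * n = n * w := Nat.mul_comm w n
        omega
      simp only [length_gridList, List.getElem_map, List.getElem_range, hdiv, hmod]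

theorem pairwise_gridList (r0 c0 : Int) (h w : Nat) :
    (gridList r0 c0 h w).Pairwise (fun a b => toLex a < toLex b) := by
  rcases Nat.eq_zero_or_pos w with rfl | hw
  · have : gridList r0 c0 h 0 = [] := by
      rw [← List.length_eq_zero_iff, length_gridList]
      exact Nat.mul_zero h
    rw [this]
    exact List.Pairwise.nil
  · rw [List.pairwise_iff_getElem]
    intro i j hi hj hij
    rw [length_gridList] at hi hj
    rw [getElem_gridList r0 c0 h w i hw hi, getElem_gridList r0 c0 h w j hw hj,
      Prod.Lex.toLex_lt_toLex]
    have hdle : i / w ≤ j / w := Nat.div_le_div_right (Nat.le_of_lt hij)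
    by_cases hd : i / w = j / w
    · right
      have h1 := Nat.div_add_mod i w
      have h2 := Nat.div_add_mod j w
      rw [hd] at h1
      constructor
      · simp [hd]
      · have : i % w < j % w := by omega
        simp only []
        omega
    · left
      have : i / w < j / w := lt_of_le_of_ne hdle hd
      simp only []
      omega

theorem nodup_gridList (r0 c0 : Int) (h w : Nat) : (gridList r0 c0 h w).Nodup :=
  (pairwise_gridList r0 c0 h w).imp (fun hab => fun he => by subst he; exact lt_irrefl _ hab)

-- B's sorted2 with fst/snd keys is the lexicographic sort
theorem sorted2_eq_sortedLex (xs : List (Int × Int)) :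
    PySem.List.sorted2 xs Prod.fst Prod.snd false
      = PySem.List.sorted xs (fun p : Int × Int => toLex p) false := by
  unfold PySem.List.sorted2 PySem.List.sorted
  simp only [if_neg (by decide : ¬ (false = true))]
  congr 1
  funext acc x
  congr 1
  funext a b
  by_cases h1 : a.1 < b.1 <;> by_cases h2 : b.1 < a.1 <;> by_cases h3 : a.2 < b.2 <;>
    simp [h1, h2, h3, Prod.Lex.toLex_lt_toLex] <;> omega

-- membership in A's nested expected-set fold
theorem mem_expected (y : Int × Int) (min_r min_c hI wI : Int) :
    (y ∈ (PySem.List.pyRange 0 hI 1).foldl (fun s dr =>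
        (PySem.List.pyRange 0 wI 1).foldl (fun s2 dc =>
          PySem.Set.add s2 (min_r + dr, min_c + dc)) s) PySem.Set.empty)
    ↔ (min_r ≤ y.1 ∧ y.1 < min_r + hI ∧ min_c ≤ y.2 ∧ y.2 < min_c + wI) := by
  have key : ∀ (l : List Int) (s0 : PySem.Set (Int × Int)),
      (y ∈ l.foldl (fun s dr => (PySem.List.pyRange 0 wI 1).foldl (fun s2 dc =>
          PySem.Set.add s2 (min_r + dr, min_c + dc)) s) s0)
      ↔ y ∈ s0 ∨ ∃ dr ∈ l, ∃ dc ∈ PySem.List.pyRange 0 wI 1, y = (min_r + dr, min_c + dc) := by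
    intro l
    induction l with
    | nil => simp
    | cons x t ih =>
      intro s0
      simp only [List.foldl_cons, ih, PySem.Set.mem_foldl_add, List.mem_cons]
      constructor
      · rintro ((h | ⟨dc, hdc, rfl⟩) | ⟨dr, hdr, dc, hdc, rfl⟩)
        · exact Or.inl h
        · exact Or.inr ⟨x, Or.inl rfl, dc, hdc, rfl⟩
        · exact Or.inr ⟨dr, Or.inr hdr, dc, hdc, rfl⟩
      · rintro (h | ⟨dr, (rfl | hdr), dc, hdc, rfl⟩)
        · exact Or.inl (Or.inl h)
        · exact Or.inl (Or.inr ⟨dc, hdc, rfl⟩)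
        · exact Or.inr ⟨dr, hdr, dc, hdc, rfl⟩
  rw [key]
  simp only [PySem.Set.empty, List.not_mem_nil, false_or, PySem.List.mem_pyRange_one]
  constructor
  · rintro ⟨dr, hdr, dc, hdc, rfl⟩
    simp only []
    omega
  · rintro ⟨h1, h2, h3, h4⟩
    refine ⟨y.1 - min_r, by omega, y.2 - min_c, by omega, ?_⟩
    ext <;> simp

theorem A_to_IsGrid (cells vs : List (Int × Int)) (hne : cells ≠ [])
    (hA : cells_form_rectangle_py cells vs = true) : IsGrid cells vs := by
  obtain ⟨⟨pr, pc⟩, rest, rfl⟩ : ∃ p rest, cells = p :: rest := by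
    cases cells with
    | nil => exact absurd rfl hne
    | cons p rest => exact ⟨p, rest, rfl⟩
  unfold cells_form_rectangle_py at hA
  simp only [List.map_cons] at hA
  rw [PySem.List.min?_id_cons, PySem.List.max?_id_cons, PySem.List.min?_id_cons,
      PySem.List.max?_id_cons] at hA
  simp only [] at hA
  set minr := (rest.map (fun rc : Int × Int => rc.1)).foldl min pr with hminr
  set maxr := (rest.map (fun rc : Int × Int => rc.1)).foldl max pr with hmaxr
  set minc := (rest.map (fun rc : Int × Int => rc.2)).foldl min pc with hminc
  set maxc := (rest.map (fun rc : Int × Int => rc.2)).foldl max pc with hmaxc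
  split_ifs at hA with hv hlen
  rw [Ne, not_not] at hlen
  have hb1 := PySem.List.foldl_min_le (rest.map (fun rc : Int × Int => rc.1)) pr
  have hb2 := PySem.List.le_foldl_max (rest.map (fun rc : Int × Int => rc.1)) pr
  have hb3 := PySem.List.foldl_min_le (rest.map (fun rc : Int × Int => rc.2)) pc
  have hb4 := PySem.List.le_foldl_max (rest.map (fun rc : Int × Int => rc.2)) pc
  have hrr : minr ≤ maxr := le_trans hb1.1 hb2.1
  have hcc : minc ≤ maxc := le_trans hb3.1 hb4.1
  set hN : Nat := (maxr - minr + 1).toNat with hhN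
  set wN : Nat := (maxc - minc + 1).toNat with hwN
  have hIc : ((hN : Nat) : Int) = maxr - minr + 1 := by omega
  have hwc : ((wN : Nat) : Int) = maxc - minc + 1 := by omega
  have hmemx := (PySem.Set.equal_iff _ _).1 hA
  have hmg : ∀ x : Int × Int, x ∈ (pr, pc) :: rest ↔ x ∈ gridList minr minc hN wN := by
    intro x
    rw [mem_gridList, hIc, hwc]
    constructor
    · intro hx
      have := (hmemx x).1 ((PySem.Set.mem_ofList _ _).2 hx)
      have := (mem_expected x minr minc (maxr - minr + 1) (maxc - minc + 1)).1 this
      omega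
    · intro hx
      exact (PySem.Set.mem_ofList _ _).1 ((hmemx x).2
        ((mem_expected x minr minc (maxr - minr + 1) (maxc - minc + 1)).2 (by omega)))
  have hnodupg := nodup_gridList minr minc hN wN
  have hlenc : ((pr, pc) :: rest).length = hN * wN := by
    have : ((((pr, pc) :: rest).length : Nat) : Int) = ((hN * wN : Nat) : Int) := by
      rw [hlen, ← hIc, ← hwc]; push_cast; ring
    exact_mod_cast this
  have hcard : ((pr, pc) :: rest).toFinset.card = ((pr, pc) :: rest).length := by
    have hfs : ((pr, pc) :: rest).toFinset = (gridList minr minc hN wN).toFinset := by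
      apply Finset.ext
      intro x
      rw [List.mem_toFinset, List.mem_toFinset, hmg]
    rw [hfs, List.toFinset_card_of_nodup hnodupg, length_gridList, hlenc]
  have hnodupc : ((pr, pc) :: rest).Nodup := by
    rw [← Multiset.coe_nodup]
    apply Multiset.toFinset_card_eq_card_iff_nodup.mp
    simpa using hcard
  have hperm : (gridList minr minc hN wN).Perm ((pr, pc) :: rest) :=
    (List.perm_ext_iff_of_nodup hnodupg hnodupc).2 (fun a => (hmg a).symm)
  exact ⟨minr, minc, hN, wN, by omega, by omega, by rw [hIc, hwc]; exact hv,
    PySem.List.sorted_eq_of_perm_of_pairwise_lt _ _ _ hperm (pairwise_gridList minr minc hN wN)⟩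

theorem IsGrid_to_A (cells vs : List (Int × Int)) (hg : IsGrid cells vs) :
    cells_form_rectangle_py cells vs = true := by
  obtain ⟨r0, c0, h, w, hh, hw, hvs, hs⟩ := hg
  have hperm : (gridList r0 c0 h w).Perm cells := by
    rw [← hs]; exact PySem.List.sorted_perm cells _ _
  have hmem : ∀ x : Int × Int, x ∈ cells ↔ x ∈ gridList r0 c0 h w :=
    fun x => (hperm.mem_iff).symm
  have hlenc : cells.length = h * w := by
    rw [← hperm.length_eq, length_gridList]
  obtain ⟨⟨pr, pc⟩, rest, rfl⟩ : ∃ p rest, cells = p :: rest := by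
    cases cells with
    | nil =>
        simp at hlenc
        omega
    | cons p rest => exact ⟨p, rest, rfl⟩
  unfold cells_form_rectangle_py
  simp only [List.map_cons]
  rw [PySem.List.min?_id_cons, PySem.List.max?_id_cons, PySem.List.min?_id_cons,
      PySem.List.max?_id_cons]
  simp only []
  set minr := (rest.map (fun rc : Int × Int => rc.1)).foldl min pr with hminr
  set maxr := (rest.map (fun rc : Int × Int => rc.1)).foldl max pr with hmaxr
  set minc := (rest.map (fun rc : Int × Int => rc.2)).foldl min pc with hminc
  set maxc := (rest.map (fun rc : Int × Int => rc.2)).foldl max pc with hmaxc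
  have hb1 := PySem.List.foldl_min_le (rest.map (fun rc : Int × Int => rc.1)) pr
  have hb2 := PySem.List.le_foldl_max (rest.map (fun rc : Int × Int => rc.1)) pr
  have hb3 := PySem.List.foldl_min_le (rest.map (fun rc : Int × Int => rc.2)) pc
  have hb4 := PySem.List.le_foldl_max (rest.map (fun rc : Int × Int => rc.2)) pc
  -- every member's coordinates are bounded by the fold extrema
  have hbnd : ∀ q : Int × Int, q ∈ (pr, pc) :: rest →
      minr ≤ q.1 ∧ q.1 ≤ maxr ∧ minc ≤ q.2 ∧ q.2 ≤ maxc := by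
    intro q hq
    rcases List.mem_cons.mp hq with rfl | hm
    · exact ⟨hb1.1, hb2.1, hb3.1, hb4.1⟩
    · exact ⟨hb1.2 _ (List.mem_map_of_mem hm), hb2.2 _ (List.mem_map_of_mem hm),
        hb3.2 _ (List.mem_map_of_mem hm), hb4.2 _ (List.mem_map_of_mem hm)⟩
  -- each extremum is attained by some member
  have hatr : ∃ q ∈ (pr, pc) :: rest, (q : Int × Int).1 = minr := by
    rcases PySem.List.foldl_min_mem (rest.map (fun rc : Int × Int => rc.1)) pr with he | hm
    · exact ⟨(pr, pc), List.mem_cons_self, he.symm⟩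
    · obtain ⟨q, hq, he⟩ := List.mem_map.1 hm
      exact ⟨q, List.mem_cons_of_mem _ hq, he⟩
  have hatR : ∃ q ∈ (pr, pc) :: rest, (q : Int × Int).1 = maxr := by
    rcases PySem.List.foldl_max_mem (rest.map (fun rc : Int × Int => rc.1)) pr with he | hm
    · exact ⟨(pr, pc), List.mem_cons_self, he.symm⟩
    · obtain ⟨q, hq, he⟩ := List.mem_map.1 hm
      exact ⟨q, List.mem_cons_of_mem _ hq, he⟩
  have hatc : ∃ q ∈ (pr, pc) :: rest, (q : Int × Int).2 = minc := by
    rcases PySem.List.foldl_min_mem (rest.map (fun rc : Int × Int => rc.2)) pc with he | hm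
    · exact ⟨(pr, pc), List.mem_cons_self, he.symm⟩
    · obtain ⟨q, hq, he⟩ := List.mem_map.1 hm
      exact ⟨q, List.mem_cons_of_mem _ hq, he⟩
  have hatC : ∃ q ∈ (pr, pc) :: rest, (q : Int × Int).2 = maxc := by
    rcases PySem.List.foldl_max_mem (rest.map (fun rc : Int × Int => rc.2)) pc with he | hm
    · exact ⟨(pr, pc), List.mem_cons_self, he.symm⟩
    · obtain ⟨q, hq, he⟩ := List.mem_map.1 hm
      exact ⟨q, List.mem_cons_of_mem _ hq, he⟩
  -- exact values of the extrema from the grid shape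
  have hcorner1 : ((r0, c0) : Int × Int) ∈ (pr, pc) :: rest := by
    rw [hmem, mem_gridList]
    constructor
    · omega
    refine ⟨by omega, by omega, by omega⟩
  have hcorner2 : ((r0 + ((h : Nat) : Int) - 1, c0) : Int × Int) ∈ (pr, pc) :: rest := by
    rw [hmem, mem_gridList]
    constructor
    · omega
    refine ⟨by omega, by omega, by omega⟩
  have hcorner3 : ((r0, c0 + ((w : Nat) : Int) - 1) : Int × Int) ∈ (pr, pc) :: rest := by
    rw [hmem, mem_gridList]
    constructor
    · omega
    refine ⟨by omega, by omega, by omega⟩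
  have hminrv : minr = r0 := by
    obtain ⟨q, hq, he⟩ := hatr
    have hbox := (mem_gridList r0 c0 h w q).1 ((hmem q).1 hq)
    have := (hbnd _ hcorner1).1
    omega
  have hmaxrv : maxr = r0 + ((h : Nat) : Int) - 1 := by
    obtain ⟨q, hq, he⟩ := hatR
    have hbox := (mem_gridList r0 c0 h w q).1 ((hmem q).1 hq)
    have := (hbnd _ hcorner2).2.1
    omega
  have hmincv : minc = c0 := by
    obtain ⟨q, hq, he⟩ := hatc
    have hbox := (mem_gridList r0 c0 h w q).1 ((hmem q).1 hq)
    have := (hbnd _ hcorner1).2.2.1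
    omega
  have hmaxcv : maxc = c0 + ((w : Nat) : Int) - 1 := by
    obtain ⟨q, hq, he⟩ := hatC
    have hbox := (mem_gridList r0 c0 h w q).1 ((hmem q).1 hq)
    have := (hbnd _ hcorner3).2.2.2
    omega
  have hIe : maxr - minr + 1 = ((h : Nat) : Int) := by omega
  have hwe : maxc - minc + 1 = ((w : Nat) : Int) := by omega
  rw [if_neg (by rw [hIe, hwe]; exact not_not_intro hvs)]
  rw [if_neg (by
    rw [Ne, not_not, hIe, hwe, hlenc]
    push_cast
    ring)]
  rw [PySem.Set.equal_iff]
  intro x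
  rw [PySem.Set.mem_ofList, mem_expected, hmem, mem_gridList]
  omega

theorem B_to_IsGrid (cells vs : List (Int × Int)) (_hne : cells ≠ [])
    (hB : cells_form_rectangle_py_alt cells vs = true) : IsGrid cells vs := by
  unfold cells_form_rectangle_py_alt at hB
  rw [sorted2_eq_sortedLex] at hB
  rcases hseq : PySem.List.sorted cells (fun p : Int × Int => toLex p) false with _ | ⟨⟨r0, c0⟩, t⟩
  · rw [hseq] at hB
    exact absurd hB (by simp)
  rw [hseq] at hB
  have hlpos : 0 < ((r0, c0) :: t).length := by simp
  have hlast : ((r0, c0) :: t).getLast (List.cons_ne_nil (r0, c0) t)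
      = ((r0, c0) :: t)[((r0, c0) :: t).length - 1]'(by omega) :=
    List.getLast_eq_getElem _
  set p1 := ((r0, c0) :: t)[((r0, c0) :: t).length - 1]'(by omega) with hp1
  obtain ⟨r1, c1⟩ := p1
  simp only [] at hB
  rw [hlast] at hB
  dsimp only at hB
  by_cases hc : ((r1 - r0 + 1, c1 - c0 + 1) ∉ vs ∨
      (((r0, c0) :: t).length : Int) ≠ (r1 - r0 + 1) * (c1 - c0 + 1))
  · rw [if_pos hc] at hB
    exact absurd hB (by simp)
  rw [if_neg hc] at hB
  push Not at hc
  obtain ⟨hvs, hlen⟩ := hc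
  -- r0 ≤ r1 from sortedness
  have hpw := PySem.List.sorted_pairwise (xs := cells) (key := fun p : Int × Int => toLex p)
  rw [hseq] at hpw
  have hmem1 : ((r1, c1) : Int × Int) ∈ (r0, c0) :: t := by
    rw [hp1]; exact List.getElem_mem _
  have hr01 : r0 ≤ r1 := by
    rcases List.mem_cons.mp hmem1 with he | hm
    · rw [Prod.mk.injEq] at he
      omega
    · have hle := (List.pairwise_cons.mp hpw).1 _ hm
      have := Prod.Lex.toLex_le_toLex.mp hle
      simp only [] at this
      omega
  -- the two dimensions are positive
  have hIpos : 0 < r1 - r0 + 1 := by omega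
  have hwpos : 0 < c1 - c0 + 1 := by
    by_contra hneg
    have h1 : (1 : Int) ≤ ((r0, c0) :: t).length := by simp
    nlinarith [hlen]
  set h : Nat := (r1 - r0 + 1).toNat with hh
  set w : Nat := (c1 - c0 + 1).toNat with hw
  have hIc : ((h : Nat) : Int) = r1 - r0 + 1 := by omega
  have hwc : ((w : Nat) : Int) = c1 - c0 + 1 := by omega
  have hlenN : ((r0, c0) :: t).length = h * w := by
    have : (((r0, c0) :: t).length : Int) = ((h * w : Nat) : Int) := by
      rw [hlen, ← hIc, ← hwc]; push_cast; ring
    exact_mod_cast this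
  -- the scan pins every element
  rw [List.all_eq_true] at hB
  have hall : ∀ (k : Nat) (hk : k < ((r0, c0) :: t).length),
      ((r0, c0) :: t)[k] = (r0 + ((k / w : Nat) : Int), c0 + ((k % w : Nat) : Int)) := by
    intro k hk
    have := hB (((0 : Int) + (k : Int)), ((r0, c0) :: t)[k]) (by
      rw [PySem.List.mem_enumerate_iff]; exact ⟨k, hk, rfl⟩)
    rw [decide_eq_true_iff] at this
    obtain ⟨h1, h2⟩ := this
    rw [zero_add, ← hwc, PySem.Int.floordiv_natCast] at h1
    rw [zero_add, ← hwc, PySem.Int.mod_natCast] at h2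
    exact Prod.ext h1 h2
  -- hence the sorted list IS the grid
  have hgrid : ((r0, c0) :: t) = gridList r0 c0 h w := by
    apply List.ext_getElem
    · rw [length_gridList, hlenN]
    · intro k hk1 hk2
      rw [hall k hk1, getElem_gridList r0 c0 h w k (by omega) (by rw [← length_gridList r0 c0 h w]; exact hk2)]
  exact ⟨r0, c0, h, w, by omega, by omega, by rw [hIc, hwc]; exact hvs, by rw [hseq, hgrid]⟩

theorem IsGrid_to_B (cells vs : List (Int × Int)) (hg : IsGrid cells vs) :
    cells_form_rectangle_py_alt cells vs = true := by
  obtain ⟨r0, c0, h, w, hh, hw, hvs, hs⟩ := hg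
  obtain ⟨h', rfl⟩ : ∃ h', h = h' + 1 := ⟨h - 1, by omega⟩
  obtain ⟨w', rfl⟩ : ∃ w', w = w' + 1 := ⟨w - 1, by omega⟩
  unfold cells_form_rectangle_py_alt
  simp only [sorted2_eq_sortedLex, hs]
  have hlen : (gridList r0 c0 (h' + 1) (w' + 1)).length = (h' + 1) * (w' + 1) :=
    length_gridList r0 c0 (h' + 1) (w' + 1)
  have hwpos : 0 < w' + 1 := by omega
  have hlpos : 0 < (gridList r0 c0 (h' + 1) (w' + 1)).length := by
    rw [hlen]
    exact Nat.mul_pos (by omega) (by omega)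
  have h0 : (gridList r0 c0 (h' + 1) (w' + 1))[0]'hlpos = (r0, c0) := by
    rw [getElem_gridList r0 c0 (h' + 1) (w' + 1) 0 hwpos (by omega)]
    simp
  have hkdiv : ((h' + 1) * (w' + 1) - 1) / (w' + 1) = h' := by
    have he : (h' + 1) * (w' + 1) - 1 = w' + h' * (w' + 1) := by
      have : (h' + 1) * (w' + 1) = h' * (w' + 1) + (w' + 1) := by ring
      omega
    rw [he, Nat.add_mul_div_right _ _ hwpos, Nat.div_eq_of_lt (by omega)]
    omega
  have hkmod : ((h' + 1) * (w' + 1) - 1) % (w' + 1) = w' := by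
    have he : (h' + 1) * (w' + 1) - 1 = w' + h' * (w' + 1) := by
      have : (h' + 1) * (w' + 1) = h' * (w' + 1) + (w' + 1) := by ring
      omega
    rw [he, Nat.add_mul_mod_self_right, Nat.mod_eq_of_lt (by omega)]
  have hglast : (gridList r0 c0 (h' + 1) (w' + 1))[(gridList r0 c0 (h' + 1) (w' + 1)).length - 1]'(by omega)
      = (r0 + (h' : Int), c0 + (w' : Int)) := by
    have hL : (gridList r0 c0 (h' + 1) (w' + 1)).length - 1 = (h' + 1) * (w' + 1) - 1 := by omega
    have := getElem_gridList r0 c0 (h' + 1) (w' + 1) ((h' + 1) * (w' + 1) - 1) hwpos (by omega)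
    rw [List.getElem_of_eq rfl (by omega)]
    simp only [hL]
    rw [this, hkdiv, hkmod]
  rcases hE : gridList r0 c0 (h' + 1) (w' + 1) with _ | ⟨q, tg⟩
  · rw [hE] at hlpos
    simp at hlpos
  have hq : q = (r0, c0) := by
    have h01 := (List.getElem_of_eq hE hlpos).symm.trans h0
    simpa using h01
  subst hq
  have hlen2 : (((r0, c0) :: tg).length : Int) = ((h' + 1 : Nat) : Int) * ((w' + 1 : Nat) : Int) := by
    rw [← hE, hlen]
    push_cast
    ring
  have hlast2 : ((r0, c0) :: tg).getLast (List.cons_ne_nil (r0, c0) tg)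
      = (r0 + (h' : Int), c0 + (w' : Int)) := by
    rw [List.getLast_eq_getElem]
    rw [← hglast]
    congr 1 <;> rw [hE]
  simp only []
  rw [hlast2]
  dsimp only
  have hIe : r0 + (h' : Int) - r0 + 1 = ((h' + 1 : Nat) : Int) := by push_cast; ring
  have hwe : c0 + (w' : Int) - c0 + 1 = ((w' + 1 : Nat) : Int) := by push_cast; ring
  rw [if_neg (by
    push Not
    refine ⟨by rw [hIe, hwe]; exact hvs, ?_⟩
    rw [hIe, hwe, hlen2])]
  rw [List.all_eq_true]
  intro kp hkp
  rw [PySem.List.mem_enumerate_iff] at hkp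
  obtain ⟨k, hk, rfl⟩ := hkp
  have hk' : k < (h' + 1) * (w' + 1) := by rw [← hlen, hE]; exact hk
  have hgk : ((r0, c0) :: tg)[k]'hk = (r0 + ((k / (w' + 1) : Nat) : Int), c0 + ((k % (w' + 1) : Nat) : Int)) := by
    rw [← getElem_gridList r0 c0 (h' + 1) (w' + 1) k hwpos hk']
    congr 1 <;> rw [hE]
  rw [decide_eq_true_iff]
  constructor
  · rw [hgk]
    dsimp only
    rw [zero_add, hwe, PySem.Int.floordiv_natCast]
  · rw [hgk]
    dsimp only
    rw [zero_add, hwe, PySem.Int.mod_natCast]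

-- ===== VERDICT (by name: the statement is the Claim_ definition above) =====
theorem cells_form_rectangle_py_spec : Claim_equal_cells_form_rectangle_py := by
  intro cells vs _hdom hpre
  unfold Spec_cells_form_rectangle_py
  have hiff : cells_form_rectangle_py cells vs = true ↔
      cells_form_rectangle_py_alt cells vs = true :=
    ⟨fun h => IsGrid_to_B cells vs (A_to_IsGrid cells vs hpre h),
     fun h => IsGrid_to_A cells vs (B_to_IsGrid cells vs hpre h)⟩
  cases hA : cells_form_rectangle_py cells vs <;>
    cases hB : cells_form_rectangle_py_alt cells vs <;> simp_all
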